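-- pv_equiv track=rewrite | github.com/javigp2002/PTC | PRACTICAS/sesion4/sesion4_ej3.py | max_min_lista
-- ===== SOURCE A (Python) =====
-- def max_min_lista(lista):
--     maximo = lista[0]
--     minimo = lista[0]
--     pos_max = 0
--     pos_min = 0
--
--     index = 0
--     for i in lista:
--         if i > maximo:
--             maximo = i
--             pos_max = lista.index(i)
--         if i < minimo:
--             minimo = i
--             pos_min = lista.index(i)
--         index += 1
--
--     return maximo, pos_max, minimo, pos_min
-- ===== SOURCE B (Python) =====
-- def max_min_lista(lista):
--     maximo = max(lista)
--     minimo = min(lista)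
--     return maximo, lista.index(maximo), minimo, lista.index(minimo)
-- ===== Notes on version B (the rewrite author's own statement) =====
-- stated objective: idiomatic
-- what changed: Replaces the manual fold that rescans with list.index on every new extremum by the idiomatic max()/min() plus one list.index lookup per extremum, removing the inner scans (worst-case O(n^2) becomes O(n), though on typical random inputs both are linear).
import Mathlib
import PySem

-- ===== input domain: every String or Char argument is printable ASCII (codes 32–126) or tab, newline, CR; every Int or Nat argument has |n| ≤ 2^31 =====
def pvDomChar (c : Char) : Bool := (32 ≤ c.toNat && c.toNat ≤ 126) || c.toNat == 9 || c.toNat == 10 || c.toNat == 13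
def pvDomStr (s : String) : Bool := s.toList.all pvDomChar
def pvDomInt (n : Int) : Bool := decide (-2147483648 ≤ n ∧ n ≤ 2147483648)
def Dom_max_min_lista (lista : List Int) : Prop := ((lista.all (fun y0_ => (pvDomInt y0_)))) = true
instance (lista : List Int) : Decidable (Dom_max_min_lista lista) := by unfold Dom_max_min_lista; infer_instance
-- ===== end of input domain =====

-- B replaces A's fold (which rescans with list.index on every new extremum, O(n^2) worst case)
-- by the idiomatic max()/min() plus one list.index lookup per extremum.

-- ===== PORT A =====
-- loop body of A; lista.index(i) never raises here since i is drawn from lista, so .getD 0 is never the default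
def pvStepA (lista : List Int) (s : Int × Int × Int × Int × Int) (i : Int) : Int × Int × Int × Int × Int :=
  let ma' := if i > s.1 then i else s.1
  let pM' := if i > s.1 then (((PySem.List.index? lista i).getD 0 : Nat) : Int) else s.2.1
  let mi' := if i < s.2.2.1 then i else s.2.2.1
  let pm' := if i < s.2.2.1 then (((PySem.List.index? lista i).getD 0 : Nat) : Int) else s.2.2.2.1
  (ma', pM', mi', pm', s.2.2.2.2 + 1)

def max_min_lista (lista : List Int) : Int × Int × Int × Int :=
  match PySem.List.pyGet? lista 0 with
  | none => (0, 0, 0, 0)   -- lista[0] raises IndexError on []; excluded by Pre_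
  | some x =>
    let s := lista.foldl (pvStepA lista) (x, 0, x, 0, 0)
    (s.1, s.2.1, s.2.2.1, s.2.2.2.1)

-- ===== PORT B =====
def max_min_lista_alt (lista : List Int) : Int × Int × Int × Int :=
  match PySem.List.max? lista (fun y => y), PySem.List.min? lista (fun y => y) with
  | some ma, some mi =>
      (ma, (((PySem.List.index? lista ma).getD 0 : Nat) : Int),
       mi, (((PySem.List.index? lista mi).getD 0 : Nat) : Int))
  | _, _ => (0, 0, 0, 0)   -- max()/min() of an empty list raises; excluded by Pre_

-- ===== PRECONDITION & SPEC =====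
-- A evaluates lista[0], which raises IndexError on the empty list; Pre_ excludes exactly that.
def Pre_max_min_lista (lista : List Int) : Prop := lista ≠ []
instance (lista : List Int) : Decidable (Pre_max_min_lista lista) := by unfold Pre_max_min_lista; infer_instance
def pvWitness_max_min_lista : List Int := [3, -1, 3]

def Spec_max_min_lista (lista : List Int) (out : Int × Int × Int × Int) : Prop := out = max_min_lista_alt lista
instance (lista : List Int) (out : Int × Int × Int × Int) : Decidable (Spec_max_min_lista lista out) := by unfold Spec_max_min_lista; infer_instance

-- ===== CLAIM (what is proved, stated in full; the proofs are below) =====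
def Claim_equal_max_min_lista : Prop := ∀ (lista : List Int), Dom_max_min_lista lista → Pre_max_min_lista lista → Spec_max_min_lista lista (max_min_lista lista)

-- ===== LEMMAS AND PROOFS =====

-- invariant of A's loop: the stored positions are always the first index of the current extremum
lemma foldA_inv (L : List Int) (xs : List Int) : ∀ (ma mi idx : Int),
    List.foldl (pvStepA L)
      (ma, (((PySem.List.index? L ma).getD 0 : Nat) : Int),
       mi, (((PySem.List.index? L mi).getD 0 : Nat) : Int), idx) xs
    = (xs.foldl max ma, (((PySem.List.index? L (xs.foldl max ma)).getD 0 : Nat) : Int),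
       xs.foldl min mi, (((PySem.List.index? L (xs.foldl min mi)).getD 0 : Nat) : Int),
       idx + xs.length) := by
  induction xs with
  | nil => intro ma mi idx; simp
  | cons i t ih =>
    intro ma mi idx
    have ema : (if i > ma then i else ma) = max ma i := by
      simp only [max_def]; split_ifs <;> omega
    have emi : (if i < mi then i else mi) = min mi i := by
      simp only [min_def]; split_ifs <;> omega
    have epM : (if i > ma then (((PySem.List.index? L i).getD 0 : Nat) : Int)
                else (((PySem.List.index? L ma).getD 0 : Nat) : Int))
             = (((PySem.List.index? L (max ma i)).getD 0 : Nat) : Int) := by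
      split_ifs with h
      · have : max ma i = i := by omega
        rw [this]
      · have : max ma i = ma := by omega
        rw [this]
    have epm : (if i < mi then (((PySem.List.index? L i).getD 0 : Nat) : Int)
                else (((PySem.List.index? L mi).getD 0 : Nat) : Int))
             = (((PySem.List.index? L (min mi i)).getD 0 : Nat) : Int) := by
      split_ifs with h
      · have : min mi i = i := by omega
        rw [this]
      · have : min mi i = mi := by omega
        rw [this]
    simp only [List.foldl_cons, pvStepA, ema, emi, epM, epm, ih]
    simp only [Prod.mk.injEq, List.length_cons, true_and]
    push_cast; ring

theorem max_min_lista_eq (x : Int) (xs : List Int) :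
    max_min_lista (x :: xs) = max_min_lista_alt (x :: xs) := by
  have h0 : PySem.List.pyGet? (x :: xs) (0 : Int) = some x := by
    simp [PySem.List.pyGet?, PySem.List.pyIdx?]
  have hidx : PySem.List.index? (x :: xs) x = some 0 := PySem.List.index?_cons_self x xs
  simp only [max_min_lista, h0, List.foldl_cons]
  have hstep : pvStepA (x :: xs) (x, 0, x, 0, 0) x
      = (x, (((PySem.List.index? (x :: xs) x).getD 0 : Nat) : Int),
         x, (((PySem.List.index? (x :: xs) x).getD 0 : Nat) : Int), 1) := by
    simp only [pvStepA, hidx]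
    norm_num
  rw [hstep, foldA_inv]
  simp only [max_min_lista_alt, PySem.List.max?_id_cons, PySem.List.min?_id_cons]

-- ===== VERDICT (by name: the statement is the Claim_ definition above) =====
theorem max_min_lista_spec : Claim_equal_max_min_lista := by
  intro lista _dom hpre
  unfold Spec_max_min_lista
  cases lista with
  | nil => exact absurd rfl hpre
  | cons x xs => exact max_min_lista_eq x xs
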